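-- pv_equiv track=rewrite | github.com/sony-jun/01-ALGORITHM | 2회차/황지선/20220725/2_두개뽑아서더하기.py | solution
-- ===== SOURCE A (Python) =====
-- def solution(numbers):
--     answer = []
--     for i in numbers:
--         for j in numbers:
--             if numbers.index(i) != numbers.index(j) :
--                 answer.append(i+j)
--
--     answer = list(set(answer))
--     return answer
-- ===== SOURCE B (Python) =====
-- def _pair_sums(vals):
--     if not vals:
--         return []
--     head, rest = vals[0], vals[1:]
--     return [head + b for b in rest] + _pair_sums(rest)
--
--
-- def solution(numbers):
--     vals = list(dict.fromkeys(numbers))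
--     return list(set(_pair_sums(vals)))
-- ===== Notes on version B (the rewrite author's own statement) =====
-- stated objective: simpler
-- what changed: Replaces the index-guarded n*n ordered double loop with its O(n) .index scans by a one-pass value dedup (dict.fromkeys) followed by a recursion that sums each unordered distinct-value pair exactly once into a set.
import Mathlib
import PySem

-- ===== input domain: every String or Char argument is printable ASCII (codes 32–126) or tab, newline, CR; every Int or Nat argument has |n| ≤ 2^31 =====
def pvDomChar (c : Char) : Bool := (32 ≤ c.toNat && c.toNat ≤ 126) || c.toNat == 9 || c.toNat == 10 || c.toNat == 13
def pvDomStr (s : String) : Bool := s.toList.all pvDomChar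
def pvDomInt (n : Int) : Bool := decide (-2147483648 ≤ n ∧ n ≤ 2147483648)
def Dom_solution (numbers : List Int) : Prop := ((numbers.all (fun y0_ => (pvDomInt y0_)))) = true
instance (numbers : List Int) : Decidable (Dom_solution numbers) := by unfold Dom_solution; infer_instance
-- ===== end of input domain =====

-- B deduplicates the values once and sums each unordered distinct-value pair exactly once by
-- recursion, instead of A's index-guarded n×n ordered double loop (simpler; return value only:
-- both end in list(set(...)), whose list is compared as the set it holds).

-- ===== PORT A =====
def solution (numbers : List Int) : List Int :=
  let answer : List Int :=
    numbers.foldl (fun acc i =>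
      numbers.foldl (fun acc2 j =>
        if PySem.List.index? numbers i ≠ PySem.List.index? numbers j then acc2 ++ [i + j]
        else acc2) acc) []
  PySem.Set.ofList answer

-- ===== PORT B =====
-- _pair_sums(vals): [vals[0]+b for b in vals[1:]] + _pair_sums(vals[1:])
def pairSums : List Int → List Int
  | [] => []
  | h :: rest => rest.map (fun b => h + b) ++ pairSums rest

def solution_alt (numbers : List Int) : List Int :=
  let vals := PySem.List.dedup numbers
  PySem.Set.ofList (pairSums vals)

-- ===== PRECONDITION & SPEC =====
def Spec_solution (numbers : List Int) (out : List Int) : Prop := out = solution_alt numbers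
instance (numbers : List Int) (out : List Int) : Decidable (Spec_solution numbers out) := by unfold Spec_solution; infer_instance

-- ===== CLAIM (what is proved, stated in full; the proofs are below) =====
def Claim_equal_solution : Prop := ∀ (numbers : List Int), Dom_solution numbers → Spec_solution numbers (solution numbers)

-- ===== LEMMAS AND PROOFS =====

-- the value-block of A's inner loop, relative to a value list ws
def pvBlock (ws : List Int) (i : Int) : List Int :=
  (ws.filter (fun j => j != i)).map (fun j => i + j)

-- numbers.index(i) == numbers.index(j) iff i == j, for members
theorem pv_index_inj (xs : List Int) (i j : Int) (hi : i ∈ xs) (_hj : j ∈ xs) :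
    PySem.List.index? xs i = PySem.List.index? xs j ↔ i = j := by
  constructor
  · intro h
    have hsi : (PySem.List.index? xs i).isSome := (PySem.List.index?_isSome_iff xs i).2 hi
    obtain ⟨k, hk⟩ := Option.isSome_iff_exists.1 hsi
    have hkj : PySem.List.index? xs j = some k := by rw [← h, hk]
    obtain ⟨hlt, hxi, _⟩ := PySem.List.getElem_of_index?_eq_some hk
    obtain ⟨hlt', hxj, _⟩ := PySem.List.getElem_of_index?_eq_some hkj
    rw [← hxi, ← hxj]
  · intro h; rw [h]

-- A's nested loops produce the flatMap of value-blocks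
theorem pv_a_shape (numbers : List Int) :
    solution numbers = PySem.Set.ofList (numbers.flatMap (pvBlock numbers)) := by
  unfold solution
  have hinner : ∀ (i : Int), i ∈ numbers → ∀ (acc : List Int),
      numbers.foldl (fun acc2 j =>
        if PySem.List.index? numbers i ≠ PySem.List.index? numbers j then acc2 ++ [i + j]
        else acc2) acc = acc ++ pvBlock numbers i := by
    intro i hi acc
    have hcongr : numbers.foldl (fun acc2 j =>
        if PySem.List.index? numbers i ≠ PySem.List.index? numbers j then acc2 ++ [i + j]
        else acc2) acc = numbers.foldl (fun acc2 j =>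
        if (j != i) = true then acc2 ++ [i + j] else acc2) acc := by
      apply PySem.List.foldl_congr_mem
      intro acc2 j hj
      by_cases h : i = j
      · subst h
        rw [if_neg (fun hc => hc rfl), if_neg (by simp)]
      · have hne : PySem.List.index? numbers i ≠ PySem.List.index? numbers j := by
          intro hc; exact h ((pv_index_inj numbers i j hi hj).1 hc)
        have hb : (j != i) = true := by
          simp only [bne_iff_ne, ne_eq]
          exact fun hc => h hc.symm
        rw [if_pos hne, if_pos hb]
    rw [hcongr, PySem.List.foldl_append_if]
    rfl
  have houter : numbers.foldl (fun acc i =>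
      numbers.foldl (fun acc2 j =>
        if PySem.List.index? numbers i ≠ PySem.List.index? numbers j then acc2 ++ [i + j]
        else acc2) acc) ([] : List Int)
      = numbers.foldl (fun acc i => acc ++ pvBlock numbers i) [] := by
    apply PySem.List.foldl_congr_mem
    intro acc i hi
    exact hinner i hi acc
  rw [houter, PySem.List.foldl_append_eq_flatMap]
  rfl

-- updating with a list already contained changes nothing
theorem pv_update_of_subset (S : PySem.Set Int) (m : List Int) (h : ∀ y ∈ m, y ∈ S) :
    S.update m = S := by
  induction m generalizing S with
  | nil => rfl
  | cons x m ih =>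
    rw [PySem.Set.update_cons, PySem.Set.add_of_mem (h x (List.mem_cons_self))]
    exact ih S (fun y hy => h y (List.mem_cons_of_mem _ hy))

-- updating with a list = updating with its set of distinct elements
theorem pv_update_ofList (S : PySem.Set Int) (l : List Int) :
    S.update l = S.update (PySem.Set.ofList l) := by
  rw [PySem.Set.update_eq_append_filter, PySem.Set.update_eq_append_filter,
    PySem.Set.ofList_ofList]

-- set(map f (filter p l)) = map f (filter p (set(l))) for injective f
theorem pv_ofList_map_filter (f : Int → Int) (hf : ∀ a b, f a = f b → a = b)
    (p : Int → Bool) (l : List Int) :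
    PySem.Set.ofList ((l.filter p).map f) = ((PySem.Set.ofList l).filter p).map f := by
  induction l using List.reverseRecOn with
  | nil => rfl
  | append_singleton l x ih =>
    rw [PySem.Set.ofList_append_singleton]
    by_cases hp : p x = true
    · have hfl : (l ++ [x]).filter p = l.filter p ++ [x] := by
        simp [List.filter_append, hp]
      rw [hfl, List.map_append, List.map_singleton, PySem.Set.ofList_append_singleton, ih]
      by_cases hm : x ∈ PySem.Set.ofList l
      · have hmf : f x ∈ ((PySem.Set.ofList l).filter p).map f :=
          List.mem_map.2 ⟨x, List.mem_filter.2 ⟨hm, hp⟩, rfl⟩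
        rw [PySem.Set.add_of_mem hmf, PySem.Set.add_of_mem hm]
      · have hmf : f x ∉ ((PySem.Set.ofList l).filter p).map f := by
          intro hc
          obtain ⟨y, hy, hyf⟩ := List.mem_map.1 hc
          exact hm ((hf y x hyf) ▸ (List.mem_filter.1 hy).1)
        rw [PySem.Set.add_of_not_mem hmf, PySem.Set.add_of_not_mem hm]
        simp [List.filter_append, hp]
    · have hfl : (l ++ [x]).filter p = l.filter p := by
        simp [List.filter_append, hp]
      rw [hfl, ih]
      by_cases hm : x ∈ PySem.Set.ofList l
      · rw [PySem.Set.add_of_mem hm]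
      · rw [PySem.Set.add_of_not_mem hm]
        simp [List.filter_append, hp]

-- a block over the raw list updates like the block over the distinct values
theorem pv_block_dedup (numbers : List Int) (i : Int) (S : PySem.Set Int) :
    S.update (pvBlock numbers i) = S.update (pvBlock (PySem.Set.ofList numbers) i) := by
  have hf : ∀ a b : Int, i + a = i + b → a = b := fun a b h => by omega
  have h1 : PySem.Set.ofList (pvBlock numbers i)
      = PySem.Set.ofList (pvBlock (PySem.Set.ofList numbers) i) := by
    unfold pvBlock
    rw [pv_ofList_map_filter _ hf, pv_ofList_map_filter _ hf, PySem.Set.ofList_ofList]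
  rw [pv_update_ofList, h1, ← pv_update_ofList]

-- replace every block over numbers by the block over the distinct values, under update
theorem pv_flat_blocks (numbers : List Int) (l : List Int) (S : PySem.Set Int) :
    S.update (l.flatMap (pvBlock numbers))
      = S.update (l.flatMap (pvBlock (PySem.Set.ofList numbers))) := by
  induction l generalizing S with
  | nil => rfl
  | cons a l ih =>
    rw [List.flatMap_cons, List.flatMap_cons, PySem.Set.update_append,
      PySem.Set.update_append, pv_block_dedup, ih]

-- flatMap over a list updates like flatMap over its distinct elements
theorem pv_flat_dedup (g : Int → List Int) (l : List Int) (S : PySem.Set Int) :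
    S.update (l.flatMap g) = S.update ((PySem.Set.ofList l).flatMap g) := by
  induction l using List.reverseRecOn generalizing S with
  | nil => rfl
  | append_singleton l a ih =>
    rw [List.flatMap_append, PySem.Set.update_append, ih,
      PySem.Set.ofList_append_singleton]
    by_cases hm : a ∈ PySem.Set.ofList l
    · rw [PySem.Set.add_of_mem hm]
      apply pv_update_of_subset
      intro y hy
      rw [List.flatMap_singleton] at hy
      have hmem : y ∈ (PySem.Set.ofList l).flatMap g :=
        List.mem_flatMap.2 ⟨a, hm, hy⟩
      exact (PySem.Set.mem_update _ _ _).2 (Or.inr hmem)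
    · rw [PySem.Set.add_of_not_mem hm, List.flatMap_append, PySem.Set.update_append,
        List.flatMap_singleton]

-- strip elements already present from the front of each block
theorem pv_strip (e : Int → Int) (f : Int → List Int) (r : List Int) (X : PySem.Set Int)
    (h : ∀ w ∈ r, e w ∈ X) :
    X.update (r.flatMap (fun w => e w :: f w)) = X.update (r.flatMap f) := by
  induction r generalizing X with
  | nil => rfl
  | cons w r ih =>
    rw [List.flatMap_cons, List.flatMap_cons, PySem.Set.update_append,
      PySem.Set.update_append, PySem.Set.update_cons,
      PySem.Set.add_of_mem (h w List.mem_cons_self)]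
    exact ih (X.update (f w)) (fun w' hw' =>
      (PySem.Set.mem_update _ _ _).2 (Or.inl (h w' (List.mem_cons_of_mem _ hw'))))

-- the core: on a duplicate-free value list, A's blocks and B's pair sums build the same set
theorem pv_main (vs : List Int) (hnd : vs.Nodup) (S : PySem.Set Int) :
    S.update (vs.flatMap (pvBlock vs)) = S.update (pairSums vs) := by
  induction vs generalizing S with
  | nil => rfl
  | cons v r ih =>
    have hvr : v ∉ r := (List.nodup_cons.1 hnd).1
    have hndr : r.Nodup := (List.nodup_cons.1 hnd).2
    have hheadblock : pvBlock (v :: r) v = r.map (fun b => v + b) := by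
      unfold pvBlock
      rw [List.filter_cons]
      simp only [bne_self_eq_false, Bool.false_eq_true, if_false]
      congr 1
      apply List.filter_eq_self.2
      intro w hw
      simp only [bne_iff_ne, ne_eq]
      exact fun hc => hvr (hc ▸ hw)
    have hrest : r.flatMap (pvBlock (v :: r)) = r.flatMap (fun w => (w + v) :: pvBlock r w) := by
      apply List.flatMap_congr
      intro w hw
      unfold pvBlock
      rw [List.filter_cons]
      have : (v != w) = true := by
        simp only [bne_iff_ne, ne_eq]
        exact fun hc => hvr (hc ▸ hw)
      rw [if_pos this, List.map_cons]
    rw [List.flatMap_cons, hheadblock, hrest, PySem.Set.update_append, pv_strip]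
    · rw [ih hndr, ← PySem.Set.update_append]
      rfl
    · intro w hw
      have hm : v + w ∈ r.map (fun b => v + b) := List.mem_map.2 ⟨w, hw, rfl⟩
      have h2 : (w + v) = (v + w) := by omega
      rw [h2]
      exact (PySem.Set.mem_update _ _ _).2 (Or.inr hm)

-- ===== VERDICT (by name: the statement is the Claim_ definition above) =====
theorem solution_spec : Claim_equal_solution := by
  intro numbers _
  unfold Spec_solution solution_alt
  rw [pv_a_shape]
  rw [← PySem.Set.update_empty, ← PySem.Set.update_empty]
  rw [pv_flat_blocks, pv_flat_dedup]
  simp only [PySem.List.dedup_eq_ofList]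
  exact pv_main (PySem.Set.ofList numbers) (PySem.Set.nodup_ofList numbers) _
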